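-- pv_equiv track=rewrite | github.com/Limpaan/Battleships | Battleships/envs/battleships_env.py | place_ship_at
-- ===== SOURCE A (Python) =====
-- def place_ship_at(grid, ship_id, bottom_left_pos, top_right_pos):
--     # Check horizontal / vertical placement
--     assert bottom_left_pos[0] == top_right_pos[0] or bottom_left_pos[1] == top_right_pos[1]
--     for x in range(max(top_right_pos[0] - bottom_left_pos[0], 1)):
--         for y in range(max(top_right_pos[1] - bottom_left_pos[1], 1)):
--             if grid[bottom_left_pos[0] + x][bottom_left_pos[1] + y] != 0:
--                 return False
--     for x in range(max(top_right_pos[0] - bottom_left_pos[0], 1)):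
--         for y in range(max(top_right_pos[1] - bottom_left_pos[1], 1)):
--             grid[bottom_left_pos[0] + x][bottom_left_pos[1] + y] = ship_id
--     return True
-- ===== SOURCE B (Python) =====
-- def place_ship_at(grid, ship_id, bottom_left_pos, top_right_pos):
--     # Single fused pass with rollback instead of validate-then-fill.
--     assert bottom_left_pos[0] == top_right_pos[0] or bottom_left_pos[1] == top_right_pos[1]
--     bx, by = bottom_left_pos
--     written = []
--     for x in range(max(top_right_pos[0] - bx, 1)):
--         for y in range(max(top_right_pos[1] - by, 1)):
--             if grid[bx + x][by + y] != 0: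
--                 for (i, j) in written:
--                     grid[i][j] = 0
--                 return False
--             grid[bx + x][by + y] = ship_id
--             written.append((bx + x, by + y))
--     return True
-- ===== Notes on version B (the rewrite author's own statement) =====
-- stated objective: alternative
-- what changed: Replaces A's two separate rectangle traversals (validate every cell, then fill every cell) with one fused traversal that writes each cell as it is checked and rolls the written cells back when a conflict is found.
-- intended difference: On self-overlapping placements that wrap around through negative indices (the index range covers the same physical cell twice) with all covered cells empty and a nonzero ship_id, A returns True and silently double-writes those cells, while B notices the overlap (it re-reads its own write) and returns False leaving the grid unchanged; refusing such a wrapped, self-aliasing placement is the intended behaviour. — e.g. on place_ship_at([[0], [0]], 5, (-2, 0), (2, 0)): A returns true, B returns false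
import Mathlib
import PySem

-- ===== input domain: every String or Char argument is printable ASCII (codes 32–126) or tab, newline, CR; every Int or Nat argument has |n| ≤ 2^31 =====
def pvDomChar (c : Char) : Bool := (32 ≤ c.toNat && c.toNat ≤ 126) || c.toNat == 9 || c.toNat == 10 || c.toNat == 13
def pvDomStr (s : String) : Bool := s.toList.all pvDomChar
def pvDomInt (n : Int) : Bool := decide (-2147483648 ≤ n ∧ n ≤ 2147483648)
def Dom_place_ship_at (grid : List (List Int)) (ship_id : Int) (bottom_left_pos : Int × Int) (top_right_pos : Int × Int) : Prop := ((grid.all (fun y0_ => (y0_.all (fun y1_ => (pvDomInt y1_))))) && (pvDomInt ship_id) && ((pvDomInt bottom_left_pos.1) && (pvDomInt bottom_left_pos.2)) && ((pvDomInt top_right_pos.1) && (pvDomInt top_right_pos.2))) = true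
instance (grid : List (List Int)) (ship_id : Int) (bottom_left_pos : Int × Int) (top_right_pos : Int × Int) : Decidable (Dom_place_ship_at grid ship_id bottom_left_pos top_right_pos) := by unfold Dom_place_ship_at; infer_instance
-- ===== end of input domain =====

-- B fuses A's validate and fill loops into one pass with rollback (return-value equivalence only:
-- both Pythons mutate `grid` in place; on D_ inputs A fills the grid while B rolls it back).

-- ===== PORT A =====
-- shared helper: Python's chained subscript `grid[i][j]` (none = IndexError)
def pvCell (grid : List (List Int)) (i j : Int) : Option Int :=
  (PySem.List.pyGet? grid i).bind (fun row => PySem.List.pyGet? row j)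

-- the two extents range(max(tr0-bl0,1)), range(max(tr1-bl1,1)) both loops of A (and B) run over
def pvDims (bl tr : Int × Int) : Int × Int := (max (tr.1 - bl.1) 1, max (tr.2 - bl.2) 1)

-- A's inner `for y in range(dy)` of the FIRST loop: early `return False` on a nonzero cell;
-- a `none` cell is an IndexError in Python (excluded by Pre_), rendered here as `.getD 1` (≠ 0)
def pvAInner (grid : List (List Int)) (i jb : Int) : Nat → Int → Bool
  | 0, _ => true
  | Nat.succ k, y =>
    if (pvCell grid i (jb + y)).getD 1 != 0 then false
    else pvAInner grid i jb k (y + 1)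

-- A's outer `for x in range(dx)` of the first loop
def pvAOuter (grid : List (List Int)) (ib jb dy : Int) : Nat → Int → Bool
  | 0, _ => true
  | Nat.succ k, x =>
    if pvAInner grid (ib + x) jb dy.toNat 0 then pvAOuter grid ib jb dy k (x + 1)
    else false

-- the failed `assert` raises AssertionError (excluded by Pre_); A's SECOND loop only mutates
-- `grid` (grid[...] = ship_id) and never changes the return value, so it is not modelled here
def place_ship_at (grid : List (List Int)) (ship_id : Int) (bottom_left_pos : Int × Int) (top_right_pos : Int × Int) : Bool :=
  if bottom_left_pos.1 == top_right_pos.1 || bottom_left_pos.2 == top_right_pos.2 then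
    pvAOuter grid bottom_left_pos.1 bottom_left_pos.2 (pvDims bottom_left_pos top_right_pos).2
      (pvDims bottom_left_pos top_right_pos).1.toNat 0
  else false

-- ===== PORT B =====
-- Python's `grid[i][j] = v` (the write B performs while scanning)
def pvWrite (grid : List (List Int)) (i j v : Int) : List (List Int) :=
  PySem.List.pySetD grid i (PySem.List.pySetD (PySem.List.pyGetD grid i []) j v)

-- B's inner `for y`: check the cell; on conflict roll back (mutation only) and stop with False
-- (`none`); otherwise write ship_id and continue with the updated grid
def pvBInner (sid i jb : Int) : Nat → Int → List (List Int) → Option (List (List Int))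
  | 0, _, grid => some grid
  | Nat.succ k, y, grid =>
    match pvCell grid i (jb + y) with
    | none => none                    -- IndexError in Python (excluded by Pre_)
    | some v =>
      if v != 0 then none             -- conflict: rollback restores the grid, return False
      else pvBInner sid i jb k (y + 1) (pvWrite grid i (jb + y) sid)

-- B's outer `for x`, threading the partially written grid
def pvBOuter (sid ib jb dy : Int) : Nat → Int → List (List Int) → Bool
  | 0, _, _ => true
  | Nat.succ k, x, grid =>
    match pvBInner sid (ib + x) jb dy.toNat 0 grid with
    | none => false
    | some g => pvBOuter sid ib jb dy k (x + 1) g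

def place_ship_at_alt (grid : List (List Int)) (ship_id : Int) (bottom_left_pos : Int × Int) (top_right_pos : Int × Int) : Bool :=
  if bottom_left_pos.1 == top_right_pos.1 || bottom_left_pos.2 == top_right_pos.2 then
    pvBOuter ship_id bottom_left_pos.1 bottom_left_pos.2 (pvDims bottom_left_pos top_right_pos).2
      (pvDims bottom_left_pos top_right_pos).1.toNat 0 grid
  else false

-- ===== PRECONDITION & SPEC =====

-- the longest row length
def pvMaxRow (grid : List (List Int)) : Nat :=
  grid.foldr (fun r acc => max r.length acc) 0

-- Pre_ excludes exactly the inputs where Python A raises: a failed alignment assert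
-- (AssertionError), or an IndexError — the first non-zero-valued event of A's row-major scan is
-- an out-of-range subscript rather than a conflict. The min(…, 2·len+1) caps on the quantifier
-- ranges only keep the condition finitely checkable: a scan prefix of in-range cells cannot span
-- more than 2·len distinct indices per axis, so the caps exclude nothing.
def Pre_place_ship_at (grid : List (List Int)) (ship_id : Int) (bottom_left_pos : Int × Int) (top_right_pos : Int × Int) : Prop :=
  (bottom_left_pos.1 = top_right_pos.1 ∨ bottom_left_pos.2 = top_right_pos.2) ∧
  ∀ x ∈ PySem.List.pyRange 0 (min (max (top_right_pos.1 - bottom_left_pos.1) 1) (2*(grid.length:Int)+1)) 1,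
    ∀ y ∈ PySem.List.pyRange 0 (min (max (top_right_pos.2 - bottom_left_pos.2) 1) (2*(pvMaxRow grid:Int)+1)) 1,
      ((∀ x' ∈ PySem.List.pyRange 0 (min (max (top_right_pos.1 - bottom_left_pos.1) 1) (2*(grid.length:Int)+1)) 1, x' < x →
          ∀ y' ∈ PySem.List.pyRange 0 (min (max (top_right_pos.2 - bottom_left_pos.2) 1) (2*(pvMaxRow grid:Int)+1)) 1,
            pvCell grid (bottom_left_pos.1 + x') (bottom_left_pos.2 + y') = some 0) ∧
       (∀ y' ∈ PySem.List.pyRange 0 (min (max (top_right_pos.2 - bottom_left_pos.2) 1) (2*(pvMaxRow grid:Int)+1)) 1, y' < y →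
          pvCell grid (bottom_left_pos.1 + x) (bottom_left_pos.2 + y') = some 0)) →
      (pvCell grid (bottom_left_pos.1 + x) (bottom_left_pos.2 + y)).isSome
instance (grid : List (List Int)) (ship_id : Int) (bottom_left_pos : Int × Int) (top_right_pos : Int × Int) : Decidable (Pre_place_ship_at grid ship_id bottom_left_pos top_right_pos) := by unfold Pre_place_ship_at; infer_instance

def pvWitness_place_ship_at : List (List Int) × Int × (Int × Int) × (Int × Int) := ([[0, 0], [0, 0]], 3, (0, 0), (0, 2))

-- On self-overlapping placements that wrap around through negative indices (the covered index
-- range is longer than the axis it lies on, so it denotes the same physical cell twice) with all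
-- covered cells empty and a nonzero ship_id, A returns True and silently double-writes those
-- cells, while B notices the overlap (it re-reads its own write) and returns False leaving the
-- grid unchanged; refusing such a wrapped, self-aliasing placement is the intended behaviour.
def D_place_ship_at (grid : List (List Int)) (ship_id : Int) (bottom_left_pos : Int × Int) (top_right_pos : Int × Int) : Prop :=
  let d := pvDims bottom_left_pos top_right_pos
  let m := ((PySem.List.pyGetD grid bottom_left_pos.1 []).length : Int)
  ship_id ≠ 0 ∧ d.1 + d.2 ≤ 2*(grid.length + m) ∧
  (grid.length < d.1 ∨ m < d.2) ∧
  ∀ x ∈ PySem.List.pyRange 0 d.1 1, ∀ y ∈ PySem.List.pyRange 0 d.2 1,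
    pvCell grid (bottom_left_pos.1 + x) (bottom_left_pos.2 + y) = some 0
instance (grid : List (List Int)) (ship_id : Int) (bottom_left_pos : Int × Int) (top_right_pos : Int × Int) : Decidable (D_place_ship_at grid ship_id bottom_left_pos top_right_pos) := by unfold D_place_ship_at; infer_instance

def Spec_place_ship_at (grid : List (List Int)) (ship_id : Int) (bottom_left_pos : Int × Int) (top_right_pos : Int × Int) (out : Bool) : Prop := ¬ D_place_ship_at grid ship_id bottom_left_pos top_right_pos → out = place_ship_at_alt grid ship_id bottom_left_pos top_right_pos
instance (grid : List (List Int)) (ship_id : Int) (bottom_left_pos : Int × Int) (top_right_pos : Int × Int) (out : Bool) : Decidable (Spec_place_ship_at grid ship_id bottom_left_pos top_right_pos out) := by unfold Spec_place_ship_at; infer_instance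

def pvDiffWitness_place_ship_at : List (List Int) × Int × (Int × Int) × (Int × Int) := ([[0], [0]], 5, (-2, 0), (2, 0))
def pvDiffWitnessOut_place_ship_at : Bool × Bool := (true, false)

-- ===== CLAIM (what is proved, stated in full; the proofs are below) =====
def Claim_unchanged_place_ship_at : Prop := ∀ (grid : List (List Int)) (ship_id : Int) (bottom_left_pos : Int × Int) (top_right_pos : Int × Int), Dom_place_ship_at grid ship_id bottom_left_pos top_right_pos → Pre_place_ship_at grid ship_id bottom_left_pos top_right_pos → Spec_place_ship_at grid ship_id bottom_left_pos top_right_pos (place_ship_at grid ship_id bottom_left_pos top_right_pos)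
def Claim_changed_place_ship_at : Prop := Dom_place_ship_at (pvDiffWitness_place_ship_at.1) (pvDiffWitness_place_ship_at.2.1) (pvDiffWitness_place_ship_at.2.2.1) (pvDiffWitness_place_ship_at.2.2.2) ∧ Pre_place_ship_at (pvDiffWitness_place_ship_at.1) (pvDiffWitness_place_ship_at.2.1) (pvDiffWitness_place_ship_at.2.2.1) (pvDiffWitness_place_ship_at.2.2.2) ∧ D_place_ship_at (pvDiffWitness_place_ship_at.1) (pvDiffWitness_place_ship_at.2.1) (pvDiffWitness_place_ship_at.2.2.1) (pvDiffWitness_place_ship_at.2.2.2) ∧ place_ship_at (pvDiffWitness_place_ship_at.1) (pvDiffWitness_place_ship_at.2.1) (pvDiffWitness_place_ship_at.2.2.1) (pvDiffWitness_place_ship_at.2.2.2) = pvDiffWitnessOut_place_ship_at.1 ∧ place_ship_at_alt (pvDiffWitness_place_ship_at.1) (pvDiffWitness_place_ship_at.2.1) (pvDiffWitness_place_ship_at.2.2.1) (pvDiffWitness_place_ship_at.2.2.2) = pvDiffWitnessOut_place_ship_at.2 ∧ pvDiffWitnessOut_place_ship_at.1 ≠ pvDiffWitnessOut_place_ship_a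t.2
def Claim_exact_place_ship_at : Prop := ∀ (grid : List (List Int)) (ship_id : Int) (bottom_left_pos : Int × Int) (top_right_pos : Int × Int), Dom_place_ship_at grid ship_id bottom_left_pos top_right_pos → Pre_place_ship_at grid ship_id bottom_left_pos top_right_pos → D_place_ship_at grid ship_id bottom_left_pos top_right_pos → place_ship_at grid ship_id bottom_left_pos top_right_pos ≠ place_ship_at_alt grid ship_id bottom_left_pos top_right_pos

-- ===== LEMMAS AND PROOFS =====

-- the physical (non-negative) index Python resolves i to, for -n <= i < n
def pvIdx (n : Nat) (i : Int) : Nat := if 0 ≤ i then i.toNat else n - (-i).toNat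
-- length of the row subscript i resolves to
def pvRowLen (grid : List (List Int)) (i : Int) : Nat :=
  (grid[pvIdx grid.length i]?.getD []).length
-- the physical cell a coordinate pair denotes
def pvPhys (grid : List (List Int)) (c : Int × Int) : Nat × Nat :=
  (pvIdx grid.length c.1, pvIdx (pvRowLen grid c.1) c.2)

-- a cell whose two subscripts are in Python range
def pvOk (grid : List (List Int)) (c : Int × Int) : Prop :=
  (-(grid.length : Int) ≤ c.1 ∧ c.1 < (grid.length : Int)) ∧
  (-((pvRowLen grid c.1 : Int)) ≤ c.2 ∧ c.2 < (pvRowLen grid c.1 : Int))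


lemma pvAllCongr {A : Type} (l : List A) (p q : A → Bool) (h : ∀ x ∈ l, p x = q x) :
    l.all p = l.all q := by
  induction l with
  | nil => rfl
  | cons a t ih =>
    simp only [List.all_cons, h a (by simp), ih (fun x hx => h x (by simp [hx]))]

lemma pvIfBne (a : Int) (x : Bool) : (if a != 0 then false else x) = ((a == 0) && x) := by
  by_cases h : a = 0 <;> simp [h]

lemma pvIfAnd (p x : Bool) : (if p then x else false) = (p && x) := by
  cases p <;> simp

lemma pvIdx?_eq (n : Nat) (i : Int) (h1 : -(n : Int) ≤ i) (h2 : i < (n : Int)) :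
    PySem.List.pyIdx? n i = some (pvIdx n i) := by
  simp only [PySem.List.pyIdx?, pvIdx]
  split_ifs <;> simp_all

lemma pvIdx_lt (n : Nat) (i : Int) (h1 : -(n : Int) ≤ i) (h2 : i < (n : Int)) :
    pvIdx n i < n := by
  simp only [pvIdx]; split_ifs <;> omega

lemma pvIdx_inj (n : Nat) (i i' : Int) (h1 : -(n : Int) ≤ i) (_h2 : i < (n : Int))
    (h1' : -(n : Int) ≤ i') (_h2' : i' < (n : Int)) (hne : i ≠ i')
    (hs : i - i' < (n : Int)) (hs' : i' - i < (n : Int)) :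
    pvIdx n i ≠ pvIdx n i' := by
  simp only [pvIdx]; split_ifs <;> omega

lemma pvIdx_add (n : Nat) (i : Int) (h1 : -(n : Int) ≤ i) (h2 : i < 0) :
    pvIdx n (i + n) = pvIdx n i := by
  simp only [pvIdx]; split_ifs <;> omega

lemma pvRowLen_congr (grid : List (List Int)) (i i' : Int)
    (h : pvIdx grid.length i = pvIdx grid.length i') :
    pvRowLen grid i = pvRowLen grid i' := by
  simp [pvRowLen, h]

lemma pvGet_eq (xs : List Int) (i : Int) (h1 : -(xs.length : Int) ≤ i) (h2 : i < (xs.length : Int)) :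
    PySem.List.pyGet? xs i = some (xs[pvIdx xs.length i]?.getD 0) := by
  simp [PySem.List.pyGet?, pvIdx?_eq _ _ h1 h2, List.getElem?_eq_getElem (pvIdx_lt _ _ h1 h2)]

lemma pvGetRow_eq (grid : List (List Int)) (i : Int) (h1 : -(grid.length : Int) ≤ i) (h2 : i < (grid.length : Int)) :
    PySem.List.pyGet? grid i = some (grid[pvIdx grid.length i]?.getD []) := by
  simp [PySem.List.pyGet?, pvIdx?_eq _ _ h1 h2, List.getElem?_eq_getElem (pvIdx_lt _ _ h1 h2)]

lemma pvCell_eq (grid : List (List Int)) (c : Int × Int) (h : pvOk grid c) :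
    pvCell grid c.1 c.2 = some ((grid[(pvPhys grid c).1]?.getD [])[(pvPhys grid c).2]?.getD 0) := by
  obtain ⟨⟨a1, a2⟩, b1, b2⟩ := h
  simp only [pvRowLen] at b1 b2
  simp [pvCell, pvGetRow_eq grid c.1 a1 a2, pvPhys,
        pvGet_eq _ c.2 b1 b2, pvRowLen]

lemma pvCell_isSome_iff (grid : List (List Int)) (c : Int × Int) :
    (pvCell grid c.1 c.2).isSome ↔ pvOk grid c := by
  constructor
  · intro h
    cases hrow : PySem.List.pyGet? grid c.1 with
    | none => simp [pvCell, hrow] at h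
    | some row =>
      have hb1 : PySem.Raise.InRange grid.length c.1 := by
        by_contra hc
        rw [(PySem.List.pyGet?_eq_none_iff grid c.1).mpr hc] at hrow; cases hrow
      obtain ⟨a1, a2⟩ := hb1
      have hrow' := pvGetRow_eq grid c.1 a1 a2
      rw [hrow] at hrow'
      have hrl : row.length = pvRowLen grid c.1 := by
        simp [pvRowLen, ← Option.some_inj.mp hrow']
      simp only [pvCell, hrow, Option.bind_some] at h
      have hb2 : PySem.Raise.InRange row.length c.2 := by
        by_contra hc
        rw [(PySem.List.pyGet?_eq_none_iff row c.2).mpr hc] at h; cases h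
      obtain ⟨b1, b2⟩ := hb2
      rw [hrl] at b1 b2
      exact ⟨⟨a1, a2⟩, b1, b2⟩
  · intro h
    rw [pvCell_eq grid c h]; rfl

lemma pvCell_congr_phys (grid : List (List Int)) (c c' : Int × Int)
    (h : pvOk grid c) (h' : pvOk grid c') (hp : pvPhys grid c = pvPhys grid c') :
    pvCell grid c.1 c.2 = pvCell grid c'.1 c'.2 := by
  rw [pvCell_eq grid c h, pvCell_eq grid c' h', hp]

lemma pvWrite_eq (grid : List (List Int)) (c : Int × Int) (v : Int) (h : pvOk grid c) :
    pvWrite grid c.1 c.2 v =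
      grid.set (pvPhys grid c).1 ((grid[(pvPhys grid c).1]?.getD []).set (pvPhys grid c).2 v) := by
  obtain ⟨⟨a1, a2⟩, b1, b2⟩ := h
  simp only [pvRowLen] at b1 b2
  simp [pvWrite, PySem.List.pySetD, PySem.List.pySet?, PySem.List.pyGetD,
        pvGetRow_eq grid c.1 a1 a2, pvIdx?_eq _ _ a1 a2, pvPhys, pvRowLen,
        pvIdx?_eq _ _ b1 b2]

lemma pvWrite_length (grid : List (List Int)) (c : Int × Int) (v : Int) (h : pvOk grid c) :
    (pvWrite grid c.1 c.2 v).length = grid.length := by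
  rw [pvWrite_eq grid c v h]; simp

lemma pvWrite_rowLen (grid : List (List Int)) (c : Int × Int) (v : Int) (h : pvOk grid c) (k : Nat) :
    ((pvWrite grid c.1 c.2 v)[k]?.getD []).length = (grid[k]?.getD []).length := by
  rw [pvWrite_eq grid c v h]
  by_cases hk : (pvPhys grid c).1 = k
  · subst hk
    have hlt : (pvPhys grid c).1 < grid.length := by
      obtain ⟨⟨a1, a2⟩, _⟩ := h
      exact pvIdx_lt _ _ a1 a2
    simp [List.getElem?_set_self hlt]
  · simp [List.getElem?_set_ne hk]

lemma pvWrite_rowLen' (grid : List (List Int)) (c : Int × Int) (v : Int) (h : pvOk grid c) (i : Int) :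
    pvRowLen (pvWrite grid c.1 c.2 v) i = pvRowLen grid i := by
  simp [pvRowLen, pvWrite_length grid c v h, pvWrite_rowLen grid c v h]

lemma pvWrite_ok (grid : List (List Int)) (c : Int × Int) (v : Int) (h : pvOk grid c) (c' : Int × Int) :
    pvOk (pvWrite grid c.1 c.2 v) c' ↔ pvOk grid c' := by
  simp [pvOk, pvWrite_length grid c v h, pvWrite_rowLen' grid c v h]

lemma pvWrite_phys (grid : List (List Int)) (c : Int × Int) (v : Int) (h : pvOk grid c) (c' : Int × Int) :
    pvPhys (pvWrite grid c.1 c.2 v) c' = pvPhys grid c' := by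
  simp [pvPhys, pvWrite_length grid c v h, pvWrite_rowLen' grid c v h]

lemma pvCell_write_ne (grid : List (List Int)) (c c' : Int × Int) (v : Int)
    (h : pvOk grid c) (h' : pvOk grid c') (hne : pvPhys grid c' ≠ pvPhys grid c) :
    pvCell (pvWrite grid c.1 c.2 v) c'.1 c'.2 = pvCell grid c'.1 c'.2 := by
  have h'w : pvOk (pvWrite grid c.1 c.2 v) c' := (pvWrite_ok grid c v h c').mpr h'
  rw [pvCell_eq _ _ h'w, pvCell_eq _ _ h', pvWrite_phys grid c v h c', pvWrite_eq grid c v h]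
  by_cases hk : (pvPhys grid c').1 = (pvPhys grid c).1
  · have hlt : (pvPhys grid c).1 < grid.length := by
      obtain ⟨⟨a1, a2⟩, _⟩ := h
      exact pvIdx_lt _ _ a1 a2
    have hj : (pvPhys grid c').2 ≠ (pvPhys grid c).2 := by
      intro hj; exact hne (Prod.ext hk hj)
    rw [hk]
    simp [List.getElem?_set_self hlt, List.getElem?_set_ne (Ne.symm hj)]
  · simp [List.getElem?_set_ne (fun e => hk e.symm)]

-- value written by pvWrite at the written physical cell
lemma pvCell_write_self (grid : List (List Int)) (c c' : Int × Int) (v : Int)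
    (h : pvOk grid c) (h' : pvOk grid c') (hp : pvPhys grid c' = pvPhys grid c) :
    pvCell (pvWrite grid c.1 c.2 v) c'.1 c'.2 = some v := by
  have h'w : pvOk (pvWrite grid c.1 c.2 v) c' := (pvWrite_ok grid c v h c').mpr h'
  rw [pvCell_eq _ _ h'w, pvWrite_phys grid c v h c', hp, pvWrite_eq grid c v h]
  have hlt : (pvPhys grid c).1 < grid.length := by
    obtain ⟨⟨a1, a2⟩, _⟩ := h
    exact pvIdx_lt _ _ a1 a2
  have hlt2 : (pvPhys grid c).2 < (grid[(pvPhys grid c).1]?.getD []).length := by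
    obtain ⟨⟨a1, a2⟩, b1, b2⟩ := h
    simpa [pvPhys, pvRowLen] using pvIdx_lt _ c.2 b1 b2
  simp [List.getElem?_set_self hlt, List.getElem?_set_self hlt2]

-- writing back the value a cell already holds leaves the grid unchanged
lemma pvWrite_self (grid : List (List Int)) (c : Int × Int)
    (h : pvOk grid c) (hv : pvCell grid c.1 c.2 = some 0) :
    pvWrite grid c.1 c.2 0 = grid := by
  rw [pvWrite_eq grid c 0 h]
  have hlt : (pvPhys grid c).1 < grid.length := by
    obtain ⟨⟨a1, a2⟩, _⟩ := h
    exact pvIdx_lt _ _ a1 a2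
  have hlt2 : (pvPhys grid c).2 < (grid[(pvPhys grid c).1]?.getD []).length := by
    obtain ⟨⟨a1, a2⟩, b1, b2⟩ := h
    simpa [pvPhys, pvRowLen] using pvIdx_lt _ c.2 b1 b2
  rw [pvCell_eq grid c h] at hv
  have hv' : (grid[(pvPhys grid c).1]?.getD [])[(pvPhys grid c).2]?.getD 0 = 0 :=
    Option.some_inj.mp hv
  have hrow : (grid[(pvPhys grid c).1]?.getD []).set (pvPhys grid c).2 0
      = grid[(pvPhys grid c).1]?.getD [] := by
    apply List.ext_getElem (by simp)
    intro n hn hn'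
    by_cases hne : n = (pvPhys grid c).2
    · subst hne
      rw [List.getElem_set_self]
      rw [List.getElem?_eq_getElem hlt2] at hv'
      simpa using hv'.symm
    · rw [List.getElem_set_ne (fun e => hne e.symm)]
  rw [hrow]
  apply List.ext_getElem (by simp)
  intro n hn hn'
  by_cases hne : n = (pvPhys grid c).1
  · subst hne
    rw [List.getElem_set_self]
    simp [List.getElem?_eq_getElem hlt]
  · rw [List.getElem_set_ne (fun e => hne e.symm)]

-- B's fused loop, abstracted to the explicit list of visited coordinates (bridged below)
def pvPlaceCellsG (sid : Int) : List (Int × Int) → List (List Int) → Option (List (List Int))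
  | [], grid => some grid
  | c :: rest, grid =>
    match pvCell grid c.1 c.2 with
    | none => none
    | some v => if v != 0 then none else pvPlaceCellsG sid rest (pvWrite grid c.1 c.2 sid)

-- a cell that is out of range or nonzero stays that way under B's writes, so the pass fails
lemma pvPlaceCellsG_none_of_bad (sid : Int) : ∀ (cells : List (Int × Int)) (grid : List (List Int)),
    (∃ c ∈ cells, pvCell grid c.1 c.2 ≠ some 0) → pvPlaceCellsG sid cells grid = none := by
  intro cells
  induction cells with
  | nil => intro grid h; simp at h
  | cons c0 rest ih =>
    intro grid h
    obtain ⟨c, hc, hbad⟩ := h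
    cases hv : pvCell grid c0.1 c0.2 with
    | none => simp [pvPlaceCellsG, hv]
    | some v =>
      by_cases hv0 : v = 0
      · subst hv0
        have hok0 : pvOk grid c0 := (pvCell_isSome_iff grid c0).mp (by simp [hv])
        have hcr : c ∈ rest := by
          rcases List.mem_cons.mp hc with h | h
          · subst h; exact absurd hv hbad
          · exact h
        simp only [pvPlaceCellsG, hv]
        rw [if_neg (by simp)]
        apply ih
        refine ⟨c, hcr, ?_⟩
        by_cases hokc : pvOk grid c
        · by_cases hp : pvPhys grid c = pvPhys grid c0
          · exact absurd ((pvCell_congr_phys grid c c0 hokc hok0 hp).trans hv) hbad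
          · rw [pvCell_write_ne grid c0 c sid hok0 hokc hp]; exact hbad
        · intro hsome
          exact hokc ((pvWrite_ok grid c0 sid hok0 c).mp
            ((pvCell_isSome_iff _ c).mp (by simp [hsome])))
      · simp [pvPlaceCellsG, hv, hv0]

-- on pairwise physically distinct, in-range cells the fused pass succeeds iff every cell of the
-- ORIGINAL grid is zero
lemma pvMain (sid : Int) : ∀ (cells : List (Int × Int)) (grid : List (List Int)),
    (∀ c ∈ cells, pvOk grid c) → (cells.map (pvPhys grid)).Nodup →
    (pvPlaceCellsG sid cells grid).isSome
      = cells.all (fun c => (pvCell grid c.1 c.2).getD 1 == 0) := by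
  intro cells
  induction cells with
  | nil => intro grid _ _; simp [pvPlaceCellsG]
  | cons c0 rest ih =>
    intro grid hok hnd
    have hc0 : pvOk grid c0 := hok c0 (by simp)
    rw [List.all_cons]
    rw [pvCell_eq grid c0 hc0]
    simp only [pvPlaceCellsG, pvCell_eq grid c0 hc0]
    by_cases hv : (grid[(pvPhys grid c0).1]?.getD [])[(pvPhys grid c0).2]?.getD 0 = 0
    · have hrec := ih (pvWrite grid c0.1 c0.2 sid)
        (fun c' hc' => (pvWrite_ok grid c0 sid hc0 c').mpr (hok c' (List.mem_cons_of_mem _ hc')))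
        (by
          have hmap : (rest.map (pvPhys (pvWrite grid c0.1 c0.2 sid))) = rest.map (pvPhys grid) := by
            apply List.map_congr_left; intro c' _; exact pvWrite_phys grid c0 sid hc0 c'
          rw [hmap]; exact hnd.of_cons)
      have hall : rest.all (fun c => (pvCell (pvWrite grid c0.1 c0.2 sid) c.1 c.2).getD 1 == 0)
          = rest.all (fun c => (pvCell grid c.1 c.2).getD 1 == 0) := by
        apply pvAllCongr
        intro c' hc'
        have hne : pvPhys grid c' ≠ pvPhys grid c0 := by
          intro he
          have hh : pvPhys grid c0 ∉ rest.map (pvPhys grid) := by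
            have h2 := hnd
            rw [List.map_cons, List.nodup_cons] at h2
            exact h2.1
          exact hh (by rw [← he]; exact List.mem_map_of_mem hc')
        rw [pvCell_write_ne grid c0 c' sid hc0 (hok c' (List.mem_cons_of_mem _ hc')) hne]
      simp [hv, hrec, hall]
    · simp [hv]

-- with ship_id = 0 the writes change nothing, so the fused pass is exactly the all-zero check
lemma pvPlaceCellsG_zero : ∀ (cells : List (Int × Int)) (grid : List (List Int)),
    (pvPlaceCellsG 0 cells grid).isSome
      = cells.all (fun c => (pvCell grid c.1 c.2).getD 1 == 0) := by
  intro cells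
  induction cells with
  | nil => intro grid; simp [pvPlaceCellsG]
  | cons c0 rest ih =>
    intro grid
    rw [List.all_cons]
    cases hv : pvCell grid c0.1 c0.2 with
    | none => simp [pvPlaceCellsG, hv]
    | some v =>
      by_cases hv0 : v = 0
      · subst hv0
        have hok0 : pvOk grid c0 := (pvCell_isSome_iff grid c0).mp (by simp [hv])
        simp only [pvPlaceCellsG, hv]
        rw [if_neg (by simp), pvWrite_self grid c0 hok0 hv, ih grid]
        simp [hv]
      · simp [pvPlaceCellsG, hv, hv0]

-- with a duplicated physical cell, empty original cells and ship_id ≠ 0 the fused pass fails: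
-- the second visit re-reads the just-written ship_id
lemma pvPlaceCellsG_dup (sid : Int) (hsid : sid ≠ 0) :
    ∀ (cells : List (Int × Int)) (grid : List (List Int)),
    (∀ c ∈ cells, pvOk grid c) → (∀ c ∈ cells, pvCell grid c.1 c.2 = some 0) →
    ¬ (cells.map (pvPhys grid)).Nodup → pvPlaceCellsG sid cells grid = none := by
  intro cells
  induction cells with
  | nil => intro grid _ _ hnd; simp at hnd
  | cons c0 rest ih =>
    intro grid hok hz hnd
    have hc0 : pvOk grid c0 := hok c0 (by simp)
    have hv0 : pvCell grid c0.1 c0.2 = some 0 := hz c0 (by simp)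
    simp only [pvPlaceCellsG, hv0]
    rw [if_neg (by simp)]
    by_cases hmem : pvPhys grid c0 ∈ rest.map (pvPhys grid)
    · obtain ⟨c', hc', hp⟩ := List.mem_map.mp hmem
      apply pvPlaceCellsG_none_of_bad
      refine ⟨c', hc', ?_⟩
      rw [pvCell_write_self grid c0 c' sid hc0 (hok c' (List.mem_cons_of_mem _ hc')) hp]
      simpa using hsid
    · have hndr : ¬ (rest.map (pvPhys grid)).Nodup := by
        intro hn
        exact hnd (by rw [List.map_cons, List.nodup_cons]; exact ⟨hmem, hn⟩)
      apply ih
      · exact fun c' hc' => (pvWrite_ok grid c0 sid hc0 c').mpr (hok c' (List.mem_cons_of_mem _ hc'))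
      · intro c' hc'
        have hne : pvPhys grid c' ≠ pvPhys grid c0 := by
          intro he; exact hmem (by rw [← he]; exact List.mem_map_of_mem hc')
        rw [pvCell_write_ne grid c0 c' sid hc0 (hok c' (List.mem_cons_of_mem _ hc')) hne]
        exact hz c' (List.mem_cons_of_mem _ hc')
      · intro hn
        apply hndr
        have hmap : (rest.map (pvPhys (pvWrite grid c0.1 c0.2 sid))) = rest.map (pvPhys grid) := by
          apply List.map_congr_left; intro c' _; exact pvWrite_phys grid c0 sid hc0 c'
        rw [← hmap]; exact hn

-- ----- bridges: the ports' fuel loops are the list-level scans -----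

lemma pvAInner_eq (grid : List (List Int)) (i jb : Int) :
    ∀ (k : Nat) (y0 : Int), pvAInner grid i jb k y0
      = (PySem.List.pyRange y0 (y0 + k) 1).all (fun y => (pvCell grid i (jb + y)).getD 1 == 0) := by
  intro k
  induction k with
  | zero =>
    intro y0
    rw [show y0 + ((0:Nat):Int) = y0 by push_cast; ring,
        PySem.List.pyRange_one_eq_nil le_rfl]
    rfl
  | succ k ih =>
    intro y0
    rw [PySem.List.pyRange_one_cons (by push_cast; omega : y0 < y0 + (k+1:Nat)), List.all_cons]
    show (if (pvCell grid i (jb + y0)).getD 1 != 0 then false else pvAInner grid i jb k (y0+1)) = _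
    rw [ih (y0 + 1), show y0 + 1 + (k:Int) = y0 + ((k+1:Nat):Int) by push_cast; omega, pvIfBne]

lemma pvAOuter_eq (grid : List (List Int)) (ib jb dy : Int) :
    ∀ (k : Nat) (x0 : Int), pvAOuter grid ib jb dy k x0
      = (PySem.List.pyRange x0 (x0 + k) 1).all (fun x => pvAInner grid (ib + x) jb dy.toNat 0) := by
  intro k
  induction k with
  | zero =>
    intro x0
    rw [show x0 + ((0:Nat):Int) = x0 by push_cast; ring,
        PySem.List.pyRange_one_eq_nil le_rfl]
    rfl
  | succ k ih =>
    intro x0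
    rw [PySem.List.pyRange_one_cons (by push_cast; omega : x0 < x0 + (k+1:Nat)), List.all_cons]
    show (if pvAInner grid (ib + x0) jb dy.toNat 0 then pvAOuter grid ib jb dy k (x0+1) else false) = _
    rw [ih (x0 + 1), show x0 + 1 + (k:Int) = x0 + ((k+1:Nat):Int) by push_cast; omega, pvIfAnd]

lemma pvBInner_eq (sid i jb : Int) :
    ∀ (k : Nat) (y0 : Int) (grid : List (List Int)), pvBInner sid i jb k y0 grid
      = pvPlaceCellsG sid ((PySem.List.pyRange y0 (y0 + k) 1).map (fun y => (i, jb + y))) grid := by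
  intro k
  induction k with
  | zero =>
    intro y0 grid
    rw [show y0 + ((0:Nat):Int) = y0 by push_cast; ring,
        PySem.List.pyRange_one_eq_nil le_rfl]
    rfl
  | succ k ih =>
    intro y0 grid
    rw [PySem.List.pyRange_one_cons (by push_cast; omega : y0 < y0 + (k+1:Nat)), List.map_cons]
    cases hv : pvCell grid i (jb + y0) with
    | none =>
      show (match pvCell grid i (jb + y0) with
        | none => none
        | some v => if v != 0 then none
            else pvBInner sid i jb k (y0 + 1) (pvWrite grid i (jb + y0) sid))
        = (match pvCell grid i (jb + y0) with
        | none => none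
        | some v => if v != 0 then none
            else pvPlaceCellsG sid ((PySem.List.pyRange (y0+1) (y0 + (k+1:Nat)) 1).map
              (fun y => (i, jb + y))) (pvWrite grid i (jb + y0) sid))
      rw [hv]
    | some v =>
      show (match pvCell grid i (jb + y0) with
        | none => none
        | some v => if v != 0 then none
            else pvBInner sid i jb k (y0 + 1) (pvWrite grid i (jb + y0) sid))
        = (match pvCell grid i (jb + y0) with
        | none => none
        | some v => if v != 0 then none
            else pvPlaceCellsG sid ((PySem.List.pyRange (y0+1) (y0 + (k+1:Nat)) 1).map
              (fun y => (i, jb + y))) (pvWrite grid i (jb + y0) sid))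
      rw [hv]
      show (if v != 0 then none
          else pvBInner sid i jb k (y0 + 1) (pvWrite grid i (jb + y0) sid)) = _
      rw [ih (y0 + 1), show y0 + 1 + (k:Int) = y0 + ((k+1:Nat):Int) by push_cast; omega]

lemma pvPlaceCellsG_append (sid : Int) : ∀ (l1 l2 : List (Int × Int)) (grid : List (List Int)),
    pvPlaceCellsG sid (l1 ++ l2) grid
      = (pvPlaceCellsG sid l1 grid).bind (pvPlaceCellsG sid l2) := by
  intro l1
  induction l1 with
  | nil => intro l2 grid; simp [pvPlaceCellsG]
  | cons c rest ih =>
    intro l2 grid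
    rw [List.cons_append]
    cases hv : pvCell grid c.1 c.2 with
    | none =>
      show (match pvCell grid c.1 c.2 with
        | none => none
        | some v => if v != 0 then none
            else pvPlaceCellsG sid (rest ++ l2) (pvWrite grid c.1 c.2 sid))
        = (match pvCell grid c.1 c.2 with
        | none => none
        | some v => if v != 0 then none
            else pvPlaceCellsG sid rest (pvWrite grid c.1 c.2 sid)).bind (pvPlaceCellsG sid l2)
      rw [hv]; rfl
    | some v =>
      show (match pvCell grid c.1 c.2 with
        | none => none
        | some v => if v != 0 then none
            else pvPlaceCellsG sid (rest ++ l2) (pvWrite grid c.1 c.2 sid))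
        = (match pvCell grid c.1 c.2 with
        | none => none
        | some v => if v != 0 then none
            else pvPlaceCellsG sid rest (pvWrite grid c.1 c.2 sid)).bind (pvPlaceCellsG sid l2)
      rw [hv]
      show (if v != 0 then none else pvPlaceCellsG sid (rest ++ l2) (pvWrite grid c.1 c.2 sid))
        = (if v != 0 then none else pvPlaceCellsG sid rest (pvWrite grid c.1 c.2 sid)).bind
            (pvPlaceCellsG sid l2)
      by_cases hv0 : (v != 0) = true
      · rw [if_pos hv0, if_pos hv0]; rfl
      · rw [if_neg hv0, if_neg hv0, ih]

lemma pvBOuter_eq (sid ib jb dy : Int) (hdy : 0 ≤ dy) :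
    ∀ (k : Nat) (x0 : Int) (grid : List (List Int)), pvBOuter sid ib jb dy k x0 grid
      = (pvPlaceCellsG sid ((PySem.List.pyRange x0 (x0 + k) 1).flatMap (fun x =>
          (PySem.List.pyRange 0 dy 1).map (fun y => (ib + x, jb + y)))) grid).isSome := by
  intro k
  induction k with
  | zero =>
    intro x0 grid
    rw [show x0 + ((0:Nat):Int) = x0 by push_cast; ring,
        PySem.List.pyRange_one_eq_nil le_rfl]
    rfl
  | succ k ih =>
    intro x0 grid
    rw [PySem.List.pyRange_one_cons (by push_cast; omega : x0 < x0 + (k+1:Nat)),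
        List.flatMap_cons, pvPlaceCellsG_append]
    show (match pvBInner sid (ib + x0) jb dy.toNat 0 grid with
      | none => false
      | some g => pvBOuter sid ib jb dy k (x0 + 1) g) = _
    rw [pvBInner_eq sid (ib + x0) jb dy.toNat 0 grid,
        show (0 : Int) + (dy.toNat : Int) = dy by rw [Int.toNat_of_nonneg hdy]; ring]
    cases hG : pvPlaceCellsG sid ((PySem.List.pyRange 0 dy 1).map (fun y => (ib + x0, jb + y))) grid with
    | none => rfl
    | some g =>
      show pvBOuter sid ib jb dy k (x0 + 1) g = _
      rw [Option.bind_some, ih (x0 + 1) g,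
          show x0 + 1 + (k:Int) = x0 + ((k+1:Nat):Int) by push_cast; omega]

-- (pvCell ≠ some 0) makes the checked boolean false
lemma pvBad_bool (grid : List (List Int)) (i j : Int) (h : pvCell grid i j ≠ some 0) :
    ((pvCell grid i j).getD 1 == 0) = false := by
  cases hv : pvCell grid i j with
  | none => simp
  | some v =>
    rw [hv] at h
    simp only [Option.getD_some]
    exact beq_eq_false_iff_ne.mpr (fun e => h (by rw [e]))

-- the two ports, rewritten to the shared list level (cond = the assert's condition)
lemma pvA_closed (grid : List (List Int)) (sid : Int) (bl tr : Int × Int)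
    (hcond : (bl.1 == tr.1 || bl.2 == tr.2) = true) :
    place_ship_at grid sid bl tr
      = (PySem.List.pyRange 0 (max (tr.1 - bl.1) 1) 1).all (fun x =>
          (PySem.List.pyRange 0 (max (tr.2 - bl.2) 1) 1).all (fun y =>
            (pvCell grid (bl.1 + x) (bl.2 + y)).getD 1 == 0)) := by
  unfold place_ship_at
  simp only [pvDims]
  rw [if_pos hcond, pvAOuter_eq]
  rw [show (0 : Int) + ((max (tr.1 - bl.1) 1).toNat : Int) = max (tr.1 - bl.1) 1 by
    rw [Int.toNat_of_nonneg (by omega)]; omega]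
  apply pvAllCongr
  intro x _
  rw [pvAInner_eq]
  rw [show (0 : Int) + ((max (tr.2 - bl.2) 1).toNat : Int) = max (tr.2 - bl.2) 1 by
    rw [Int.toNat_of_nonneg (by omega)]; omega]

lemma pvB_closed (grid : List (List Int)) (sid : Int) (bl tr : Int × Int)
    (hcond : (bl.1 == tr.1 || bl.2 == tr.2) = true) :
    place_ship_at_alt grid sid bl tr
      = (pvPlaceCellsG sid ((PySem.List.pyRange 0 (max (tr.1 - bl.1) 1) 1).flatMap (fun x =>
          (PySem.List.pyRange 0 (max (tr.2 - bl.2) 1) 1).map (fun y =>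
            (bl.1 + x, bl.2 + y)))) grid).isSome := by
  unfold place_ship_at_alt
  simp only [pvDims]
  rw [if_pos hcond, pvBOuter_eq sid bl.1 bl.2 _ (by omega)]
  rw [show (0 : Int) + ((max (tr.1 - bl.1) 1).toNat : Int) = max (tr.1 - bl.1) 1 by
    rw [Int.toNat_of_nonneg (by omega)]; omega]

-- ===== VERDICT =====
theorem place_ship_at_spec : Claim_unchanged_place_ship_at := by
  intro grid sid bl tr _ hpre hnd
  have hcond : (bl.1 == tr.1 || bl.2 == tr.2) = true := by
    rcases hpre.1 with h | h <;> simp [h]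
  set dx := max (tr.1 - bl.1) 1 with hdxdef
  set dy := max (tr.2 - bl.2) 1 with hdydef
  set m0 := pvRowLen grid bl.1 with hm0
  have hdx1 : (1 : Int) ≤ dx := by omega
  have hdy1 : (1 : Int) ≤ dy := by omega
  rw [pvA_closed grid sid bl tr hcond, pvB_closed grid sid bl tr hcond]
  set cells := (PySem.List.pyRange 0 dx 1).flatMap (fun x =>
    (PySem.List.pyRange 0 dy 1).map (fun y => (bl.1 + x, bl.2 + y))) with hcells
  by_cases hall : ∀ x ∈ PySem.List.pyRange 0 dx 1, ∀ y ∈ PySem.List.pyRange 0 dy 1,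
      pvCell grid (bl.1 + x) (bl.2 + y) = some 0
  · -- every covered cell is in range and zero: A returns True
    have hcellz : ∀ c ∈ cells, pvCell grid c.1 c.2 = some 0 := by
      intro c hc
      rw [hcells, List.mem_flatMap] at hc
      obtain ⟨x, hx, hcm⟩ := hc
      obtain ⟨y, hy, rfl⟩ := List.mem_map.mp hcm
      exact hall x hx y hy
    have hok : ∀ c ∈ cells, pvOk grid c := fun c hc =>
      (pvCell_isSome_iff grid c).mp (by simp only [hcellz c hc, Option.isSome_some])
    have hA : (PySem.List.pyRange 0 dx 1).all (fun x =>
        (PySem.List.pyRange 0 dy 1).all (fun y =>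
          (pvCell grid (bl.1 + x) (bl.2 + y)).getD 1 == 0)) = true := by
      simp only [List.all_eq_true]
      intro x hx y hy
      simp [hall x hx y hy]
    rw [hA]
    have hx0 : (0 : Int) ∈ PySem.List.pyRange 0 dx 1 := by
      rw [PySem.List.mem_pyRange_one]; omega
    have hy0 : (0 : Int) ∈ PySem.List.pyRange 0 dy 1 := by
      rw [PySem.List.mem_pyRange_one]; omega
    have hxl : dx - 1 ∈ PySem.List.pyRange 0 dx 1 := by
      rw [PySem.List.mem_pyRange_one]; omega
    have hyl : dy - 1 ∈ PySem.List.pyRange 0 dy 1 := by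
      rw [PySem.List.mem_pyRange_one]; omega
    have hok00 : pvOk grid (bl.1 + 0, bl.2 + 0) :=
      (pvCell_isSome_iff grid _).mp (by simp only [hall 0 hx0 0 hy0, Option.isSome_some])
    have hokx : pvOk grid (bl.1 + (dx - 1), bl.2 + 0) :=
      (pvCell_isSome_iff grid _).mp (by simp only [hall (dx - 1) hxl 0 hy0, Option.isSome_some])
    have hoky : pvOk grid (bl.1 + 0, bl.2 + (dy - 1)) :=
      (pvCell_isSome_iff grid _).mp (by simp only [hall 0 hx0 (dy - 1) hyl, Option.isSome_some])
    have hdxN : dx ≤ 2 * (grid.length : Int) := by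
      have h1 := hok00.1
      have h2 := hokx.1
      simp only at h1 h2
      omega
    have hdyM : dy ≤ 2 * (m0 : Int) := by
      have h1 := hok00.2
      have h2 := hoky.2
      simp only [add_zero] at h1 h2
      omega
    by_cases hsid : sid = 0
    · subst hsid
      rw [pvPlaceCellsG_zero cells grid]
      symm
      simp only [List.all_eq_true]
      intro c hc
      simp [hcellz c hc]
    · by_cases hdisj : ((grid.length : Int) < dx ∨ (m0 : Int) < dy)
      · -- all the conjuncts of D_ hold: contradiction with ¬ D_
        exfalso
        apply hnd
        have hre : ((PySem.List.pyGetD grid bl.1 []).length : Int) = (m0 : Int) := by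
          have hb := hok00.1
          simp only [add_zero] at hb
          simp only [PySem.List.pyGetD, pvGetRow_eq grid bl.1 hb.1 hb.2, Option.getD_some]
          rfl
        unfold D_place_ship_at
        simp only [pvDims, hre]
        rw [← hdxdef, ← hdydef]
        exact ⟨hsid, by omega, hdisj, hall⟩
      · -- no self-overlap: all physical cells distinct, and the fused pass is the all-zero check
        push_neg at hdisj
        have hnodup : (cells.map (pvPhys grid)).Nodup := by
          rcases hpre.1 with h | h
          · -- bl.1 = tr.1: a 1×dy strip in a single row, physically distinct columns
            have hdxe : dx = 1 := by rw [hdxdef, h]; simp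
            rw [hcells, hdxe]
            rw [show PySem.List.pyRange 0 1 1 = [0] from by decide]
            rw [List.flatMap_singleton, List.map_map]
            apply (PySem.List.nodup_pyRange_one 0 dy).map_on
            intro y hy y' hy' heq
            by_contra hne
            have hby := ((pvCell_isSome_iff grid (bl.1 + 0, bl.2 + y)).mp
              (by simp only [hall 0 (by rw [PySem.List.mem_pyRange_one, hdxe]; omega) y hy, Option.isSome_some])).2
            have hby' := ((pvCell_isSome_iff grid (bl.1 + 0, bl.2 + y')).mp
              (by simp only [hall 0 (by rw [PySem.List.mem_pyRange_one, hdxe]; omega) y' hy', Option.isSome_some])).2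
            rw [PySem.List.mem_pyRange_one] at hy hy'
            have hm0' : (pvRowLen grid (bl.1 + 0) : Int) = (m0 : Int) := by
              rw [add_zero]
            exact pvIdx_inj (pvRowLen grid (bl.1 + 0)) (bl.2 + y) (bl.2 + y')
              hby.1 hby.2 hby'.1 hby'.2 (by omega)
              (by rw [hm0']; omega) (by rw [hm0']; omega)
              (congrArg Prod.snd heq)
          · -- bl.2 = tr.2: a dx×1 strip in a single column, physically distinct rows
            have hdye : dy = 1 := by rw [hdydef, h]; simp
            rw [hcells, hdye]
            rw [show PySem.List.pyRange 0 1 1 = [0] from by decide]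
            simp only [List.map_singleton]
            have hflat : (PySem.List.pyRange 0 dx 1).flatMap (fun x => [(bl.1 + x, bl.2 + 0)])
                = (PySem.List.pyRange 0 dx 1).map (fun x => (bl.1 + x, bl.2 + 0)) := by
              induction PySem.List.pyRange 0 dx 1 with
              | nil => rfl
              | cons a t ih =>
                simp only [List.flatMap_cons, List.map_cons, List.singleton_append, ih]
            rw [hflat, List.map_map]
            apply (PySem.List.nodup_pyRange_one 0 dx).map_on
            intro x hx x' hx' heq
            by_contra hne
            have hbx := ((pvCell_isSome_iff grid (bl.1 + x, bl.2 + 0)).mp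
              (by simp only [hall x hx 0 (by rw [PySem.List.mem_pyRange_one, hdye]; omega), Option.isSome_some])).1
            have hbx' := ((pvCell_isSome_iff grid (bl.1 + x', bl.2 + 0)).mp
              (by simp only [hall x' hx' 0 (by rw [PySem.List.mem_pyRange_one, hdye]; omega), Option.isSome_some])).1
            rw [PySem.List.mem_pyRange_one] at hx hx'
            exact pvIdx_inj grid.length (bl.1 + x) (bl.1 + x')
              hbx.1 hbx.2 hbx'.1 hbx'.2 (by omega) (by omega) (by omega)
              (congrArg Prod.fst heq)
        rw [pvMain sid cells grid hok hnodup]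
        symm
        simp only [List.all_eq_true]
        intro c hc
        simp [hcellz c hc]
  · -- some covered cell is out of range or nonzero: both sides return False
    push_neg at hall
    obtain ⟨x, hx, y, hy, hbad⟩ := hall
    have hmem : (bl.1 + x, bl.2 + y) ∈ cells := by
      rw [hcells, List.mem_flatMap]
      exact ⟨x, hx, List.mem_map.mpr ⟨y, hy, rfl⟩⟩
    rw [pvPlaceCellsG_none_of_bad sid cells grid ⟨_, hmem, hbad⟩]
    have hA : (PySem.List.pyRange 0 dx 1).all (fun x =>
        (PySem.List.pyRange 0 dy 1).all (fun y =>
          (pvCell grid (bl.1 + x) (bl.2 + y)).getD 1 == 0)) = false := by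
      apply Bool.eq_false_iff.mpr
      intro hAt
      rw [List.all_eq_true] at hAt
      have h1 := hAt x hx
      rw [List.all_eq_true] at h1
      have h2 := h1 y hy
      rw [pvBad_bool grid _ _ hbad] at h2
      exact absurd h2 (by decide)
    rw [hA]; rfl

theorem place_ship_at_changed : Claim_changed_place_ship_at := by
  unfold Claim_changed_place_ship_at; decide

theorem place_ship_at_tight : Claim_exact_place_ship_at := by
  intro grid sid bl tr _ hpre hd
  unfold D_place_ship_at at hd
  simp only [pvDims] at hd
  obtain ⟨hsid, -, hdisj0, hall⟩ := hd
  have hcond : (bl.1 == tr.1 || bl.2 == tr.2) = true := by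
    rcases hpre.1 with h | h <;> simp [h]
  set dx := max (tr.1 - bl.1) 1 with hdxdef
  set dy := max (tr.2 - bl.2) 1 with hdydef
  set m0 := pvRowLen grid bl.1 with hm0
  have hdx1 : (1 : Int) ≤ dx := by omega
  have hdy1 : (1 : Int) ≤ dy := by omega
  rw [pvA_closed grid sid bl tr hcond, pvB_closed grid sid bl tr hcond]
  set cells := (PySem.List.pyRange 0 dx 1).flatMap (fun x =>
    (PySem.List.pyRange 0 dy 1).map (fun y => (bl.1 + x, bl.2 + y))) with hcells
  have hcellz : ∀ c ∈ cells, pvCell grid c.1 c.2 = some 0 := by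
    intro c hc
    rw [hcells, List.mem_flatMap] at hc
    obtain ⟨x, hx, hcm⟩ := hc
    obtain ⟨y, hy, rfl⟩ := List.mem_map.mp hcm
    exact hall x hx y hy
  have hok : ∀ c ∈ cells, pvOk grid c := fun c hc =>
    (pvCell_isSome_iff grid c).mp (by simp only [hcellz c hc, Option.isSome_some])
  have hx0 : (0 : Int) ∈ PySem.List.pyRange 0 dx 1 := by
    rw [PySem.List.mem_pyRange_one]; omega
  have hy0 : (0 : Int) ∈ PySem.List.pyRange 0 dy 1 := by
    rw [PySem.List.mem_pyRange_one]; omega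
  have hmem00 : (bl.1 + 0, bl.2 + 0) ∈ cells := by
    rw [hcells, List.mem_flatMap]
    exact ⟨0, hx0, List.mem_map.mpr ⟨0, hy0, rfl⟩⟩
  have hok00 := hok _ hmem00
  have hre : ((PySem.List.pyGetD grid bl.1 []).length : Int) = (m0 : Int) := by
    have hb := hok00.1
    simp only [add_zero] at hb
    simp only [PySem.List.pyGetD, pvGetRow_eq grid bl.1 hb.1 hb.2, Option.getD_some]
    rfl
  rw [hre] at hdisj0
  -- exhibit the two distinct coordinates denoting the same physical cell
  have hdup : ¬ (cells.map (pvPhys grid)).Nodup := by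
    rcases hdisj0 with hr | hc2
    · -- row wraparound: x = 0 and x = len(grid) hit the same physical row
      have hxN : (grid.length : Int) ∈ PySem.List.pyRange 0 dx 1 := by
        rw [PySem.List.mem_pyRange_one]; omega
      have hmemN : (bl.1 + (grid.length : Int), bl.2 + 0) ∈ cells := by
        rw [hcells, List.mem_flatMap]
        exact ⟨(grid.length : Int), hxN, List.mem_map.mpr ⟨0, hy0, rfl⟩⟩
      have hokN := hok _ hmemN
      have hblneg : bl.1 < 0 := by
        have := hokN.1
        simp only at this
        omega
      have hfst : pvIdx grid.length (bl.1 + (grid.length : Int)) = pvIdx grid.length (bl.1 + 0) := by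
        rw [add_zero]
        exact pvIdx_add grid.length bl.1 (by have := hok00.1; simp only [add_zero] at this; omega) hblneg
      have hphys : pvPhys grid (bl.1 + (grid.length : Int), bl.2 + 0)
          = pvPhys grid (bl.1 + 0, bl.2 + 0) := by
        have hrl : pvRowLen grid (bl.1 + (grid.length : Int)) = pvRowLen grid (bl.1 + 0) :=
          pvRowLen_congr grid _ _ hfst
        simp only [pvPhys, hfst, hrl]
      intro hn
      have heq := List.inj_on_of_nodup_map hn hmemN hmem00 hphys
      have : (grid.length : Int) = 0 := by
        have h1 := congrArg Prod.fst heq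
        simp only at h1
        omega
      have hN1 : 0 < grid.length := by
        have := hok00.1
        simp only at this
        omega
      omega
    · -- column wraparound: y = 0 and y = rowlen hit the same physical cell of the row
      have hyM : ((m0 : Int)) ∈ PySem.List.pyRange 0 dy 1 := by
        rw [PySem.List.mem_pyRange_one]
        constructor
        · positivity
        · omega
      have hmemM : (bl.1 + 0, bl.2 + (m0 : Int)) ∈ cells := by
        rw [hcells, List.mem_flatMap]
        exact ⟨0, hx0, List.mem_map.mpr ⟨(m0 : Int), hyM, rfl⟩⟩
      have hokM := hok _ hmemM
      have hm0' : pvRowLen grid (bl.1 + 0) = m0 := by rw [add_zero]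
      have hblneg : bl.2 < 0 := by
        have := hokM.2
        rw [hm0'] at this
        omega
      have hsnd : pvIdx m0 (bl.2 + (m0 : Int)) = pvIdx m0 (bl.2 + 0) := by
        rw [add_zero]
        exact pvIdx_add m0 bl.2 (by have := hok00.2; rw [hm0'] at this; omega) hblneg
      have hphys : pvPhys grid (bl.1 + 0, bl.2 + (m0 : Int))
          = pvPhys grid (bl.1 + 0, bl.2 + 0) := by
        simp only [pvPhys, hm0']
        rw [hsnd]
      intro hn
      have heq := List.inj_on_of_nodup_map hn hmemM hmem00 hphys
      have hm1 : 0 < m0 := by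
        have := hok00.2
        rw [hm0'] at this
        omega
      have : (m0 : Int) = 0 := by
        have h2 := congrArg Prod.snd heq
        simp only at h2
        omega
      omega
  rw [pvPlaceCellsG_dup sid hsid cells grid hok hcellz hdup]
  have hA : (PySem.List.pyRange 0 dx 1).all (fun x =>
      (PySem.List.pyRange 0 dy 1).all (fun y =>
        (pvCell grid (bl.1 + x) (bl.2 + y)).getD 1 == 0)) = true := by
    simp only [List.all_eq_true]
    intro x hx y hy
    simp [hall x hx y hy]
  rw [hA]
  simp
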